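-- pv_equiv track=rewrite | github.com/joshanashakya/dissertation | workspace/dataset/java-python/GeeksForGeeks/3765/A/2.py | cntRotations
-- ===== SOURCE A (Python) =====
-- def cntRotations(s, n):
--
--     # Create a new string
--     str = s + s;
--
--     # Pre array to store count of all vowels
--     pre = [0] * (2 * n);
--
--     # Compute the prefix array
--     for i in range(2 * n):
--         if (i != 0):
--             pre[i] += pre[i - 1];
--
--         if (str[i] == 'a' or str[i] == 'e' or
--             str[i] == 'i' or str[i] == 'o' or
--             str[i] == 'u'):
--             pre[i] += 1;
--
--     # To store the required answer
--     ans = 0;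
--
--     # Find all rotated strings
--     for i in range(n - 1, 2 * n - 1, 1):
--
--         # Right and left index of the string
--         r = i; l = i - n;
--
--         # x1 stores the number of vowels
--         # in the rotated string
--         x1 = pre[r];
--         if (l >= 0):
--             x1 -= pre[l];
--         r = (int)(i - n / 2);
--
--         # Left stores the number of vowels
--         # in the first half of rotated string
--         left = pre[r];
--         if (l >= 0):
--             left -= pre[l];
--
--         # Right stores the number of vowels
--         # in the second half of rotated string
--         right = x1 - left;
--
--         # If the count of vowels in the first half
--         # is greater than the count in the second half
--         if (left > right):
--             ans += 1;
--
--     # Return the required answer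
--     return ans;
-- ===== SOURCE B (Python) =====
-- def cntRotations(s, n):
--     # Sliding window over s+s: carry vowel counts of the whole rotation and of its
--     # first floor(n/2) characters across rotations instead of a prefix-sum array.
--     if n <= 0:
--         return 0
--     vowels = "aeiou"
--     t = s + s
--     h = n // 2
--     tot = sum(1 for c in t[:n] if c in vowels)
--     first = sum(1 for c in t[:h] if c in vowels)
--     ans = 1 if 2 * first > tot else 0
--     for i in range(n, 2 * n - 1):
--         tot += (t[i] in vowels) - (t[i - n] in vowels)
--         first += (t[i - n + h] in vowels) - (t[i - n] in vowels)
--         if 2 * first > tot: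
--             ans += 1
--     return ans
-- ===== Notes on version B (the rewrite author's own statement) =====
-- stated objective: faster
-- what changed: B replaces A's prefix-sum array over s+s (built in one loop, then queried per rotation) by a sliding window that carries the vowel counts of the whole rotation and of its first floor(n/2) characters across rotations, updating each by the one character that leaves and the one that enters.
-- intended difference: For n = 1 with a vowel first character A returns 1 because int(i - n/2) truncates -0.5 toward zero, making the 'first half' of a 1-character rotation the whole character; B returns 0, the intended value, since the first floor(1/2) = 0 characters contain no vowel so the first half can never have more vowels than the second. — e.g. on cntRotations("a", 1): A returns 1, B returns 0
import Mathlib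
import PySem

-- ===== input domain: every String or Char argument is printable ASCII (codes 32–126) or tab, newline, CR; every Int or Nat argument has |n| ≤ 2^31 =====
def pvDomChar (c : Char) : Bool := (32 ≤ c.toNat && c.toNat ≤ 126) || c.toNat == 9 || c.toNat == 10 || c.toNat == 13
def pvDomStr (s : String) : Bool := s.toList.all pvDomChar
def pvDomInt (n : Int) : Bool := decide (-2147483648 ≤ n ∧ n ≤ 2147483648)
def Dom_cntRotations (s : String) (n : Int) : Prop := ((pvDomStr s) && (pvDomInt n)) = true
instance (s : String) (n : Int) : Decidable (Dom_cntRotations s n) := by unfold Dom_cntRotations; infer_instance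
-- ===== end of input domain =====

-- B replaces A's prefix-sum array over s+s by a sliding window that carries running vowel
-- counts across rotations (measured faster by a constant factor: no prefix array is built);
-- for n = 1 with a vowel first character B intentionally differs from A (see D_cntRotations).

-- ===== PORT A =====
def pvVowel (c : Char) : Bool :=
  c == 'a' || c == 'e' || c == 'i' || c == 'o' || c == 'u'

-- body of A's first loop: 'if i != 0: pre[i] += pre[i-1]' then 'if str[i] is a vowel: pre[i] += 1'
def pvStepPre (str : List Char) (pre : List Int) (i : Int) : List Int :=
  let pre := if i ≠ 0 then
      PySem.List.pySetD pre i (PySem.List.pyGetD pre i 0 + PySem.List.pyGetD pre (i - 1) 0)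
    else pre
  if pvVowel (PySem.List.pyGetD str i ' ') then
    PySem.List.pySetD pre i (PySem.List.pyGetD pre i 0 + 1)
  else pre

-- body of A's second loop
def pvStepAns (pre : List Int) (n : Int) (ans : Int) (i : Int) : Int :=
  let l := i - n
  let x1 := PySem.List.pyGetD pre i 0
  let x1 := if l ≥ 0 then x1 - PySem.List.pyGetD pre l 0 else x1
  -- '(int)(i - n / 2)': i - n/2 is the exact float (2*i - n)/2 here (all values well below 2^53)
  -- and int() truncates toward zero, so truncdiv (2*i - n) 2 is exact
  let r := PySem.Int.truncdiv (2 * i - n) 2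
  let left := PySem.List.pyGetD pre r 0
  let left := if l ≥ 0 then left - PySem.List.pyGetD pre l 0 else left
  let right := x1 - left
  if left > right then ans + 1 else ans

def cntRotations (s : String) (n : Int) : Int :=
  let str := s.toList ++ s.toList
  let pre := (PySem.List.pyRange 0 (2 * n) 1).foldl (pvStepPre str)
      (List.replicate (2 * n).toNat 0)
  (PySem.List.pyRange (n - 1) (2 * n - 1) 1).foldl (pvStepAns pre n) 0

-- ===== PORT B =====
-- 'c in "aeiou"' of Source B
def pvVowelB (c : Char) : Bool := (['a', 'e', 'i', 'o', 'u'] : List Char).contains c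

-- body of B's sliding-window loop; state = (tot, first, ans)
def pvStepB (t : List Char) (n h : Int) (st : Int × Int × Int) (i : Int) : Int × Int × Int :=
  let tot := st.1 + (if pvVowelB (PySem.List.pyGetD t i ' ') then 1 else 0)
                  - (if pvVowelB (PySem.List.pyGetD t (i - n) ' ') then 1 else 0)
  let first := st.2.1 + (if pvVowelB (PySem.List.pyGetD t (i - n + h) ' ') then 1 else 0)
                      - (if pvVowelB (PySem.List.pyGetD t (i - n) ' ') then 1 else 0)
  let ans := if 2 * first > tot then st.2.2 + 1 else st.2.2
  (tot, first, ans)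

def cntRotations_alt (s : String) (n : Int) : Int :=
  if n ≤ 0 then 0
  else
    let t := s.toList ++ s.toList
    let h := PySem.Int.floordiv n 2
    let tot : Int := ((PySem.List.slice t none (some n)).countP pvVowelB : Int)
    let first : Int := ((PySem.List.slice t none (some h)).countP pvVowelB : Int)
    let ans : Int := if 2 * first > tot then 1 else 0
    ((PySem.List.pyRange n (2 * n - 1) 1).foldl (pvStepB t n h) (tot, first, ans)).2.2

-- ===== PRECONDITION & SPEC =====
-- A raises IndexError exactly when n > len(s) (str = s+s is read at indices up to 2n-1);
-- for every n ≤ len(s), including n ≤ 0, A returns normally.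
def Pre_cntRotations (s : String) (n : Int) : Prop := n ≤ (s.toList.length : Int)
instance (s : String) (n : Int) : Decidable (Pre_cntRotations s n) := by unfold Pre_cntRotations; infer_instance
def pvWitness_cntRotations : String × Int := ("abe", 3)

-- For n = 1 with a vowel first character, A returns 1 (int(i - n/2) truncates -0.5 toward zero, so A's 'first half' of a
-- 1-character rotation is the whole character); B returns 0, the intended value: the first floor(1/2) = 0 characters hold
-- no vowel, so the first half can never have more vowels than the second.
def D_cntRotations (s : String) (n : Int) : Prop :=
  n = 1 ∧ s.toList.head? ∈ ([some 'a', some 'e', some 'i', some 'o', some 'u'] : List (Option Char))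
instance (s : String) (n : Int) : Decidable (D_cntRotations s n) := by unfold D_cntRotations; infer_instance

def Spec_cntRotations (s : String) (n : Int) (out : Int) : Prop := ¬ D_cntRotations s n → out = cntRotations_alt s n
instance (s : String) (n : Int) (out : Int) : Decidable (Spec_cntRotations s n out) := by unfold Spec_cntRotations; infer_instance

def pvDiffWitness_cntRotations : String × Int := ("a", 1)
def pvDiffWitnessOut_cntRotations : Int × Int := (1, 0)

-- ===== CLAIM (what is proved, stated in full; the proofs are below) =====
def Claim_unchanged_cntRotations : Prop := ∀ (s : String) (n : Int), Dom_cntRotations s n → Pre_cntRotations s n → Spec_cntRotations s n (cntRotations s n)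
def Claim_changed_cntRotations : Prop := Dom_cntRotations (pvDiffWitness_cntRotations.1) (pvDiffWitness_cntRotations.2) ∧ Pre_cntRotations (pvDiffWitness_cntRotations.1) (pvDiffWitness_cntRotations.2) ∧ D_cntRotations (pvDiffWitness_cntRotations.1) (pvDiffWitness_cntRotations.2) ∧ cntRotations (pvDiffWitness_cntRotations.1) (pvDiffWitness_cntRotations.2) = pvDiffWitnessOut_cntRotations.1 ∧ cntRotations_alt (pvDiffWitness_cntRotations.1) (pvDiffWitness_cntRotations.2) = pvDiffWitnessOut_cntRotations.2 ∧ pvDiffWitnessOut_cntRotations.1 ≠ pvDiffWitnessOut_cntRotations.2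
def Claim_exact_cntRotations : Prop := ∀ (s : String) (n : Int), Dom_cntRotations s n → Pre_cntRotations s n → D_cntRotations s n → cntRotations s n ≠ cntRotations_alt s n

-- ===== LEMMAS AND PROOFS =====

-- vowel count of the first k characters of t
def pvP (t : List Char) (k : Nat) : Int := ((t.take k).countP pvVowel : Int)

-- A's test for the rotation whose window starts at w (loop index i = n - 1 + w)
def pvCondA (t : List Char) (N : Nat) (n : Int) (w : Nat) : Bool :=
  decide (2 * (pvP t ((PySem.Int.truncdiv (2 * ((n - 1) + (w : Int)) - n) 2).toNat + 1) - pvP t w)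
    > pvP t (w + N) - pvP t w)

-- B's test for the window starting at w
def pvCondB (t : List Char) (N H : Nat) (w : Nat) : Bool :=
  decide (2 * (pvP t (w + H) - pvP t w) > pvP t (w + N) - pvP t w)

theorem pvVowelB_eq (c : Char) : pvVowelB c = pvVowel c := by
  simp only [pvVowelB, pvVowel, List.contains_cons, List.contains_nil, Bool.or_false,
    Bool.or_assoc]

theorem pvP_succ (t : List Char) (k : Nat) (hk : k < t.length) :
    pvP t (k + 1) = pvP t k + (if pvVowel (t.getD k ' ') then 1 else 0) := by
  unfold pvP
  rw [List.take_add_one, List.getElem?_eq_getElem hk]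
  rw [List.getD_eq_getElem?_getD, List.getElem?_eq_getElem hk]
  simp only [List.countP_append, Option.toList_some, List.countP_cons, List.countP_nil,
    Option.getD_some]
  split_ifs <;> push_cast <;> omega

-- the prefix array built by A's first loop, read elementwise
theorem pre_spec (t : List Char) (L k : Nat) (hkL : k ≤ L) (hL : L ≤ t.length) :
    ((PySem.List.pyRange 0 (k : Int) 1).foldl (pvStepPre t) (List.replicate L 0)).length = L ∧
    ∀ j : Nat, PySem.List.pyGetD
        ((PySem.List.pyRange 0 (k : Int) 1).foldl (pvStepPre t) (List.replicate L 0)) (j : Int) 0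
      = if j < k then pvP t (j + 1) else 0 := by
  induction k with
  | zero =>
      rw [show ((0 : Nat) : Int) = 0 by norm_num, PySem.List.pyRange_one_eq_nil le_rfl]
      refine ⟨by simp, fun j => ?_⟩
      simp [PySem.List.pyGetD_natCast, List.getD]
  | succ k ih =>
      have hk : k ≤ L := by omega
      obtain ⟨ihlen, ihval⟩ := ih hk
      have hkL' : k < L := by omega
      have hkt : k < t.length := by omega
      rw [show ((k + 1 : Nat) : Int) = (k : Int) + 1 by push_cast; ring,
        PySem.List.pyRange_one_succ_right (by positivity), List.foldl_append,
        List.foldl_cons, List.foldl_nil]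
      set Fk := (PySem.List.pyRange 0 (k : Int) 1).foldl (pvStepPre t) (List.replicate L 0) with hFk
      unfold pvStepPre
      have hget_k : PySem.List.pyGetD Fk (k : Int) 0 = 0 := by simp [ihval k]
      have step1 : ∀ j : Nat,
          PySem.List.pyGetD (if (k : Int) ≠ 0 then
              PySem.List.pySetD Fk (k : Int) (PySem.List.pyGetD Fk (k : Int) 0 + PySem.List.pyGetD Fk ((k : Int) - 1) 0)
            else Fk) (j : Int) 0
          = if j = k then pvP t k else if j < k then pvP t (j + 1) else 0 := by
        intro j
        by_cases hk0 : k = 0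
        · subst hk0
          simp only [Int.natCast_zero, ne_eq, not_true_eq_false, ite_false]
          rw [ihval j]
          rcases Nat.eq_zero_or_pos j with hj | hj
          · subst hj; simp [pvP]
          · have : ¬ j < 0 := by omega
            have : ¬ j = 0 := by omega
            simp_all
        · have hne : ((k : Int) ≠ 0) := by exact_mod_cast hk0
          rw [if_pos hne]
          rw [show ((k : Int) - 1) = ((k - 1 : Nat) : Int) by omega]
          rw [ihval (k - 1), hget_k]
          have h1 : k - 1 < k := by omega
          rw [if_pos h1]
          have h2 : (k - 1) + 1 = k := by omega
          rw [h2]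
          rw [PySem.List.pyGetD_pySetD_natCast Fk k j _ 0 (by rw [ihlen]; exact hkL')]
          simp [ihval j]
      have len1 : (if (k : Int) ≠ 0 then
              PySem.List.pySetD Fk (k : Int) (PySem.List.pyGetD Fk (k : Int) 0 + PySem.List.pyGetD Fk ((k : Int) - 1) 0)
            else Fk).length = L := by
        split_ifs <;> simp [ihlen]
      set A1 := (if (k : Int) ≠ 0 then
              PySem.List.pySetD Fk (k : Int) (PySem.List.pyGetD Fk (k : Int) 0 + PySem.List.pyGetD Fk ((k : Int) - 1) 0)
            else Fk) with hA1
      have hA1k : PySem.List.pyGetD A1 (k : Int) 0 = pvP t k := by simp [step1 k]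
      have htread : PySem.List.pyGetD t (k : Int) ' ' = t.getD k ' ' := PySem.List.pyGetD_natCast t k ' '
      constructor
      · split_ifs <;> simp [len1]
      · intro j
        rw [htread]
        by_cases hv : pvVowel (t.getD k ' ') = true
        · rw [if_pos hv, hA1k,
            PySem.List.pyGetD_pySetD_natCast A1 k j _ 0 (by rw [len1]; exact hkL'), step1 j]
          by_cases hjk : j = k
          · subst hjk
            rw [if_pos rfl, if_pos (show j < j + 1 by omega),
              pvP_succ t j hkt, if_pos hv]
          · rw [if_neg hjk, if_neg hjk]
            by_cases hjlt : j < k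
            · rw [if_pos hjlt, if_pos (by omega)]
            · rw [if_neg hjlt, if_neg (by omega)]
        · rw [if_neg hv, step1 j]
          by_cases hjk : j = k
          · subst hjk
            rw [if_pos rfl, if_pos (by omega), pvP_succ t j hkt, if_neg hv, add_zero]
          · rw [if_neg hjk]
            by_cases hjlt : j < k
            · rw [if_pos hjlt, if_pos (by omega)]
            · rw [if_neg hjlt, if_neg (by omega)]

-- one iteration of A's answer loop, at loop index i = n - 1 + w
theorem stepAns_eq (t : List Char) (pre : List Int) (N : Nat) (n : Int) (w : Nat) (acc : Int)
    (hnN : (N : Int) = n) (hn : 1 ≤ n) (hwN : w < N)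
    (hpval' : ∀ i : Int, 0 ≤ i →
      PySem.List.pyGetD pre i 0 = if i.toNat < 2 * N then pvP t (i.toNat + 1) else 0) :
    pvStepAns pre n acc (n - 1 + (w : Int)) = if pvCondA t N n w then acc + 1 else acc := by
  have hi0 : (0 : Int) ≤ n - 1 + (w : Int) := by omega
  have hiN : (n - 1 + (w : Int)).toNat = N - 1 + w := by omega
  have hrq : 0 ≤ PySem.Int.truncdiv (2 * (n - 1 + (w : Int)) - n) 2 ∧
      (PySem.Int.truncdiv (2 * (n - 1 + (w : Int)) - n) 2).toNat < 2 * N := by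
    unfold PySem.Int.truncdiv
    rw [Int.tdiv_eq_ediv, show (2 : Int).sign = 1 from rfl]
    constructor <;> (split_ifs <;> omega)
  obtain ⟨hr0, hrlt⟩ := hrq
  unfold pvStepAns pvCondA
  simp only [decide_eq_true_eq]
  rw [hpval' _ hi0, if_pos (show (n - 1 + (w : Int)).toNat < 2 * N by rw [hiN]; omega),
      hiN, show N - 1 + w + 1 = w + N by omega]
  rw [hpval' _ hr0, if_pos hrlt]
  by_cases hl : n - 1 + (w : Int) - n ≥ 0
  · rw [if_pos hl, if_pos hl, hpval' _ (by omega),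
      if_pos (show (n - 1 + (w : Int) - n).toNat < 2 * N by omega),
      show (n - 1 + (w : Int) - n).toNat + 1 = w by omega]
    split_ifs with h1 h2 h2 <;> first | rfl | (exfalso; omega)
  · rw [if_neg hl, if_neg hl]
    have hw0 : w = 0 := by omega
    subst hw0
    have h0 : pvP t 0 = 0 := rfl
    split_ifs with h1 h2 h2 <;> first | rfl | (exfalso; omega)

-- A's result as a count over window starts
theorem A_count (s : String) (n : Int) (hn : 1 ≤ n) (hlen : n ≤ (s.toList.length : Int)) :
    cntRotations s n
      = ((List.range n.toNat).countP (pvCondA (s.toList ++ s.toList) n.toNat n) : Int) := by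
  unfold cntRotations
  set t := s.toList ++ s.toList with ht
  set N := n.toNat with hN
  have hnN : (N : Int) = n := Int.toNat_of_nonneg (by omega)
  have htlen : 2 * N ≤ t.length := by
    rw [ht, List.length_append]; omega
  have h2n : (2 * n) = ((2 * N : Nat) : Int) := by push_cast; omega
  rw [h2n, Int.toNat_natCast]
  obtain ⟨hplen, hpval⟩ := pre_spec t (2 * N) (2 * N) le_rfl htlen
  set pre := (PySem.List.pyRange 0 ((2 * N : Nat) : Int) 1).foldl (pvStepPre t)
      (List.replicate (2 * N) 0) with hpre
  have hpval' : ∀ i : Int, 0 ≤ i →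
      PySem.List.pyGetD pre i 0 = if i.toNat < 2 * N then pvP t (i.toNat + 1) else 0 := by
    intro i hi
    conv_lhs => rw [show i = ((i.toNat : Nat) : Int) by omega]
    rw [hpval i.toNat]
  rw [PySem.List.pyRange_one (n - 1) (((2 * N : Nat) : Int) - 1)]
  rw [show ((((2 * N : Nat) : Int) - 1) - (n - 1)).toNat = N by omega]
  rw [List.foldl_map]
  rw [PySem.List.foldl_congr_mem (List.range N)
      (fun acc k => pvStepAns pre n acc ((n - 1) + (k : Int)))
      (fun acc w => if pvCondA t N n w then acc + 1 else acc) 0 ?_]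
  · rw [PySem.List.foldl_if_add_one (pvCondA t N n) (List.range N) 0]
    simp
  · intro acc w hw
    exact stepAns_eq t pre N n w acc hnN hn (List.mem_range.mp hw) hpval'

theorem countPB (l : List Char) : l.countP pvVowelB = l.countP pvVowel :=
  List.countP_congr (fun a _ => by rw [pvVowelB_eq])

theorem vb_step (t : List Char) (k : Nat) (hk : k < t.length) :
    (if pvVowelB (t.getD k ' ') then (1 : Int) else 0) = pvP t (k + 1) - pvP t k := by
  rw [pvVowelB_eq, pvP_succ t k hk]; ring

-- invariant of B's sliding-window loop
theorem B_loop (t : List Char) (N H : Nat) (hH : H ≤ N) (hN1 : 1 ≤ N)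
    (htlen : 2 * N ≤ t.length) (a₀ : Int) (u : Nat) (hu : u ≤ N - 1) :
    (PySem.List.pyRange (N : Int) ((N : Int) + (u : Int)) 1).foldl
        (pvStepB t (N : Int) (H : Int)) (pvP t N, pvP t H, a₀)
      = (pvP t (u + N) - pvP t u, pvP t (u + H) - pvP t u,
         a₀ + ((List.range u).countP (fun v => pvCondB t N H (v + 1)) : Int)) := by
  induction u with
  | zero =>
      rw [show ((N : Int) + ((0 : Nat) : Int)) = (N : Int) by push_cast; ring,
        PySem.List.pyRange_one_eq_nil le_rfl]
      simp [show pvP t 0 = 0 from rfl]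
  | succ u ih =>
      have hu' : u ≤ N - 1 := by omega
      rw [show ((N : Int) + ((u + 1 : Nat) : Int)) = ((N : Int) + (u : Int)) + 1 by push_cast; ring,
        PySem.List.pyRange_one_succ_right (by omega), List.foldl_append,
        List.foldl_cons, List.foldl_nil, ih hu']
      unfold pvStepB
      simp only []
      have e1 : PySem.List.pyGetD t ((N : Int) + (u : Int)) ' ' = t.getD (u + N) ' ' := by
        rw [show ((N : Int) + (u : Int)) = ((u + N : Nat) : Int) by push_cast; ring,
          PySem.List.pyGetD_natCast]
      have e2 : ((N : Int) + (u : Int) - (N : Int)) = ((u : Nat) : Int) := by ring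
      have e3 : ((u : Nat) : Int) + ((H : Nat) : Int) = ((u + H : Nat) : Int) := by push_cast; ring

      rw [e1, e2, e3, PySem.List.pyGetD_natCast t (u + H), PySem.List.pyGetD_natCast t u]
      rw [vb_step t (u + N) (by omega), vb_step t u (by omega), vb_step t (u + H) (by omega)]
      have g1 : pvP t (u + N) - pvP t u + (pvP t (u + N + 1) - pvP t (u + N))
          - (pvP t (u + 1) - pvP t u) = pvP t ((u + 1) + N) - pvP t (u + 1) := by
        rw [show (u + 1) + N = u + N + 1 by omega]; ring
      have g2 : pvP t (u + H) - pvP t u + (pvP t (u + H + 1) - pvP t (u + H))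
          - (pvP t (u + 1) - pvP t u) = pvP t ((u + 1) + H) - pvP t (u + 1) := by
        rw [show (u + 1) + H = u + H + 1 by omega]; ring
      rw [g1, g2]
      refine Prod.ext rfl (Prod.ext rfl ?_)
      simp only []
      rw [List.range_succ, List.countP_append, List.countP_cons, List.countP_nil]
      unfold pvCondB
      simp only [decide_eq_true_eq]
      split_ifs <;> omega

-- B's result as a count over window starts
theorem B_count (s : String) (n : Int) (hn : 1 ≤ n) (hlen : n ≤ (s.toList.length : Int)) :
    cntRotations_alt s n
      = ((List.range n.toNat).countP
          (pvCondB (s.toList ++ s.toList) n.toNat (PySem.Int.floordiv n 2).toNat) : Int) := by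
  simp only [cntRotations_alt]
  rw [if_neg (by omega)]
  set t := s.toList ++ s.toList with ht
  set N := n.toNat with hN
  have hnN : (N : Int) = n := Int.toNat_of_nonneg (by omega)
  have htlen : 2 * N ≤ t.length := by rw [ht, List.length_append]; omega
  have hfl : PySem.Int.floordiv n 2 = ((N / 2 : Nat) : Int) := by
    rw [← hnN]; exact_mod_cast PySem.Int.floordiv_natCast N 2
  set H := N / 2 with hH
  have hHN : H ≤ N := by omega
  have hfln : (PySem.Int.floordiv n 2).toNat = H := by rw [hfl]; omega
  rw [hfl]
  rw [PySem.List.slice_to t (show (0:Int) ≤ n by omega),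
      PySem.List.slice_to t (show (0:Int) ≤ ((H : Nat) : Int) by positivity)]
  simp only [Int.toNat_natCast]
  rw [show n.toNat = N from rfl]
  simp only [countPB]
  have hto : ∀ k : Nat, ((List.take k t).countP pvVowel : Int) = pvP t k := fun _ => rfl
  rw [hto N, hto H]
  rw [show 2 * n - 1 = (N : Int) + ((N - 1 : Nat) : Int) by omega, ← hnN]
  rw [B_loop t N H hHN (by omega) htlen _ (N - 1) le_rfl]
  simp only []
  rw [show List.range N = 0 :: (List.range (N - 1)).map (· + 1) from by
        rw [show N = (N - 1) + 1 by omega, List.range_succ_eq_map]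
        simp]
  rw [List.countP_cons, List.countP_map]
  have hc0 : (if 2 * pvP t H > pvP t N then (1:Int) else 0)
      = if pvCondB t N H 0 = true then (1:Int) else 0 := by
    have h0 : pvP t 0 = 0 := rfl
    unfold pvCondB
    simp only [decide_eq_true_eq, Nat.zero_add]
    split_ifs with h1 h2 h2 <;> first | rfl | (exfalso; omega)
  simp only [Function.comp_def]
  rw [hc0]
  push_cast
  ring

-- for n ≥ 2 the truncating index int(i - n/2) lands exactly on the first floor(n/2) characters
theorem condA_eq_condB (t : List Char) (n : Int) (hn : 2 ≤ n) (w : Nat) (hw : (w : Int) < n) :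
    pvCondA t n.toNat n w = pvCondB t n.toNat (PySem.Int.floordiv n 2).toNat w := by
  unfold pvCondA pvCondB
  have hidx : (PySem.Int.truncdiv (2 * ((n - 1) + (w : Int)) - n) 2).toNat + 1
      = w + (PySem.Int.floordiv n 2).toNat := by
    have hfl : PySem.Int.floordiv n 2 = n / 2 :=
      PySem.Int.floordiv_eq_ediv_of_pos (by omega)
    unfold PySem.Int.truncdiv
    rw [Int.tdiv_eq_ediv, show (2 : Int).sign = 1 from rfl, hfl]
    split_ifs <;> omega
  rw [hidx]

theorem vowel_mem (c : Char) :
    pvVowel c = true ↔ some c ∈ ([some 'a', some 'e', some 'i', some 'o', some 'u'] : List (Option Char)) := by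
  simp [pvVowel]
  tauto

theorem pvP_one (c : Char) (l : List Char) :
    pvP (c :: l) 1 = if pvVowel c then 1 else 0 := by
  unfold pvP
  simp [List.countP_cons]

-- at n = 1 A's condition is 'the single character is a vowel', B's is false
theorem n1_conds (c : Char) (l : List Char) :
    (pvCondA (c :: l) 1 1 0 = true ↔ pvVowel c = true)
    ∧ pvCondB (c :: l) 1 0 0 = false := by
  constructor
  · unfold pvCondA
    rw [show (PySem.Int.truncdiv (2 * (((1:Int) - 1) + ((0:Nat) : Int)) - 1) 2).toNat + 1 = 1 by decide]
    simp only [decide_eq_true_eq, Nat.zero_add]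
    have h0 : pvP (c :: l) 0 = 0 := rfl
    rw [pvP_one c l]
    split_ifs with hv <;> simp [hv] <;> omega
  · unfold pvCondB
    have h0 : pvP (c :: l) 0 = 0 := rfl
    simp only [Nat.zero_add, Nat.add_zero]
    rw [pvP_one c l]
    split_ifs with hv <;> simp [h0]

-- ===== VERDICT (by name: the statement is the Claim_ definition above) =====
theorem cntRotations_spec : Claim_unchanged_cntRotations := by
  intro s n _hdom hpre
  unfold Spec_cntRotations
  intro hnd
  unfold Pre_cntRotations at hpre
  by_cases hn0 : n ≤ 0
  · unfold cntRotations cntRotations_alt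
    rw [if_pos hn0,
      PySem.List.pyRange_one_eq_nil (show (2 * n - 1 : Int) ≤ n - 1 by omega),
      PySem.List.pyRange_one_eq_nil (show (2 * n : Int) ≤ 0 by omega)]
    simp
  · have hn1 : 1 ≤ n := by omega
    rw [A_count s n hn1 hpre, B_count s n hn1 hpre]
    congr 1
    apply List.countP_congr
    intro w hw
    have hw' : w < n.toNat := List.mem_range.mp hw
    have hwn : (w : Int) < n := by omega
    by_cases hn2 : 2 ≤ n
    · rw [condA_eq_condB (s.toList ++ s.toList) n hn2 w hwn]
    · have hne : n = 1 := by omega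
      subst hne
      have hw0 : w = 0 := by omega
      subst hw0
      obtain ⟨c, l, hcl⟩ : ∃ c l, s.toList = c :: l := by
        cases h : s.toList with
        | nil => rw [h] at hpre; simp at hpre
        | cons c l => exact ⟨c, l, rfl⟩
      have hnv : ¬ pvVowel c = true := by
        intro hv
        exact hnd ⟨rfl, by rw [hcl]; simpa using (vowel_mem c).mp hv⟩
      have ht : s.toList ++ s.toList = c :: (l ++ (c :: l)) := by rw [hcl]; simp
      rw [ht, show (1:Int).toNat = 1 from rfl, show (PySem.Int.floordiv 1 2).toNat = 0 from rfl]
      obtain ⟨ha, hb⟩ := n1_conds c (l ++ (c :: l))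
      rw [hb]
      constructor
      · intro h; exact absurd (ha.mp h) hnv
      · intro h; simp at h

theorem cntRotations_changed : Claim_changed_cntRotations := by
  unfold Claim_changed_cntRotations; decide

theorem cntRotations_tight : Claim_exact_cntRotations := by
  intro s n _hdom hpre hD
  obtain ⟨hn1, hmem⟩ := hD
  subst hn1
  unfold Pre_cntRotations at hpre
  obtain ⟨c, l, hcl⟩ : ∃ c l, s.toList = c :: l := by
    cases h : s.toList with
    | nil => rw [h] at hmem; simp at hmem
    | cons c l => exact ⟨c, l, rfl⟩
  have hv : pvVowel c = true := by
    rw [hcl] at hmem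
    exact (vowel_mem c).mpr (by simpa using hmem)
  rw [A_count s 1 (by omega) hpre, B_count s 1 (by omega) hpre]
  have ht : s.toList ++ s.toList = c :: (l ++ (c :: l)) := by rw [hcl]; simp
  rw [ht, show (1:Int).toNat = 1 from rfl, show (PySem.Int.floordiv 1 2).toNat = 0 from rfl]
  obtain ⟨ha, hb⟩ := n1_conds c (l ++ (c :: l))
  rw [show List.range 1 = [0] from rfl]
  rw [List.countP_cons, List.countP_cons, List.countP_nil, hb]
  rw [if_pos (ha.mpr hv)]
  simp
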